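-- pv_equiv track=rewrite | github.com/mortezamg63/JobAssistant | resumeBuilder2/app.py | split_into_subsections
-- ===== SOURCE A (Python) =====
-- def split_into_subsections(lines):
--     subs, title, buf = [], None, []
--     for raw in lines:
--         if '|' in raw:
--             if title: subs.append((title, buf))
--             title, buf = raw.strip(), []
--         else:
--             buf.append(raw)
--     if title: subs.append((title, buf))
--     return subs or [(None, lines)]
-- ===== SOURCE B (Python) =====
-- def split_into_subsections(lines):
--     # Recursive chunking: find the next title line, slice its body, recurse on the rest.
--     def chunks(rest):
--         # rest[0] is a title line (contains '|')
--         title, body = rest[0].strip(), rest[1:]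
--         k = next((j for j, l in enumerate(body) if '|' in l), len(body))
--         out = [(title, body[:k])]
--         if k < len(body):
--             out += chunks(body[k:])
--         return out
--     i = next((j for j, l in enumerate(lines) if '|' in l), len(lines))
--     return chunks(lines[i:]) if i < len(lines) else [(None, lines)]
-- ===== Notes on version B (the rewrite author's own statement) =====
-- stated objective: alternative
-- what changed: Replaces A's single-pass accumulator loop (subs/title/buf state with a post-loop flush) by a recursive decomposition: locate the next title line, slice out its body, and recurse on the remainder.
import Mathlib
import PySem

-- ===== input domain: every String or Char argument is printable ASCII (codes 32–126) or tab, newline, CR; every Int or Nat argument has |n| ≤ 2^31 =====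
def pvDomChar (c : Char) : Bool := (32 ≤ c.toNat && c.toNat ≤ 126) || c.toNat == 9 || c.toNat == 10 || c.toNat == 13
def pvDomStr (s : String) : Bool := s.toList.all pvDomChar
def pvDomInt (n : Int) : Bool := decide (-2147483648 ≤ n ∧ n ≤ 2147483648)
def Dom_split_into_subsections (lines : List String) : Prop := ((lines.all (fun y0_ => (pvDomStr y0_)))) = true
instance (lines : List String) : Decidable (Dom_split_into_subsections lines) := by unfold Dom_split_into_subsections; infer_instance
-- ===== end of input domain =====

-- B replaces A's single-pass accumulator loop by recursive chunking (find next title line, slice, recurse); same O(n) cost.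

-- ===== PORT A =====
-- '|' in raw  (exact: substring membership)
def pvHasBar (s : String) : Bool := PySem.Str.isIn "|" s

-- Python truthiness of the `title` variable (None or a str)
def pvTruthyOptStr : Option String → Bool
  | none => false
  | some t => t != ""

-- `if title: subs.append((title, buf))` — occurs inside the loop and after it
def pvFlushA (st : List (Option String × List String) × Option String × List String) :
    List (Option String × List String) :=
  if pvTruthyOptStr st.2.1 then st.1 ++ [(st.2.1, st.2.2)] else st.1

-- one iteration of A's for-loop over state (subs, title, buf)
def pvStepA (st : List (Option String × List String) × Option String × List String)
    (raw : String) : List (Option String × List String) × Option String × List String :=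
  if pvHasBar raw then (pvFlushA st, some (PySem.Str.strip raw), [])
  else (st.1, st.2.1, st.2.2 ++ [raw])

def split_into_subsections (lines : List String) : List (Option String × List String) :=
  let st := lines.foldl pvStepA ([], none, [])
  let subs := pvFlushA st
  if subs.isEmpty then [(none, lines)] else subs

-- ===== PORT B =====
-- chunks(rest): rest[0] is a title line; k = index of next title in the body (len(body) if none)
def pvChunks : List String → List (Option String × List String)
  | [] => []
  | t :: body =>
    let k := body.findIdx pvHasBar
    (some (PySem.Str.strip t), body.take k) ::
      (if k < body.length then pvChunks (body.drop k) else [])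
termination_by l => l.length
decreasing_by simp [List.length_drop]

def split_into_subsections_alt (lines : List String) : List (Option String × List String) :=
  let i := lines.findIdx pvHasBar
  if i < lines.length then pvChunks (lines.drop i) else [(none, lines)]

-- ===== PRECONDITION & SPEC =====
def Spec_split_into_subsections (lines : List String) (out : List (Option String × List String)) : Prop := out = split_into_subsections_alt lines
instance (lines : List String) (out : List (Option String × List String)) : Decidable (Spec_split_into_subsections lines out) := by unfold Spec_split_into_subsections; infer_instance

-- ===== CLAIM (what is proved, stated in full; the proofs are below) =====
def Claim_equal_split_into_subsections : Prop := ∀ (lines : List String), Dom_split_into_subsections lines → Spec_split_into_subsections lines (split_into_subsections lines)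

-- ===== LEMMAS AND PROOFS =====

-- common recursive description of the section list once a (stripped) title t is current
def pvSections : String → List String → List String → List (Option String × List String)
  | t, buf, [] => [(some t, buf)]
  | t, buf, r :: rest =>
    if pvHasBar r then (some t, buf) :: pvSections (PySem.Str.strip r) [] rest
    else pvSections t (buf ++ [r]) rest

lemma mem_dropWhile_of_not {α : Type} (p : α → Bool) {l : List α} {c : α}
    (hm : c ∈ l) (hp : p c = false) : c ∈ l.dropWhile p := by
  have h := List.takeWhile_append_dropWhile (p := p) (l := l)
  rw [← h] at hm
  rcases List.mem_append.mp hm with h1 | h2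
  · exact absurd (List.mem_takeWhile_imp h1) (by simp [hp])
  · exact h2

lemma bar_mem_of_hasBar {s : String} (h : pvHasBar s = true) : '|' ∈ s.toList := by
  unfold pvHasBar PySem.Str.isIn at h
  have hinf : ("|" : String).toList <:+: s.toList := (PySem.Chars.isIn_iff_infix _ _).mp h
  have := hinf.sublist.subset
  exact this (by simp)

lemma strip_ne_of_hasBar {s : String} (h : pvHasBar s = true) : PySem.Str.strip s ≠ "" := by
  intro he
  have hm : '|' ∈ s.toList := bar_mem_of_hasBar h
  have h1 : '|' ∈ PySem.Chars.lstrip s.toList :=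
    mem_dropWhile_of_not _ hm (by decide)
  have h2 : '|' ∈ PySem.Chars.strip s.toList := by
    unfold PySem.Chars.strip PySem.Chars.rstrip
    rw [List.mem_reverse]
    exact mem_dropWhile_of_not _ (List.mem_reverse.mpr h1) (by decide)
  have h3 : (PySem.Str.strip s).toList = PySem.Chars.strip s.toList := PySem.Str.toList_strip s
  rw [he] at h3
  rw [← h3] at h2
  simp at h2

lemma pvSections_ne_nil (t : String) (buf rest : List String) :
    pvSections t buf rest ≠ [] := by
  induction rest generalizing t buf with
  | nil => simp [pvSections]
  | cons r rest ih =>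
    by_cases hb : pvHasBar r
    · simp [pvSections, hb]
    · simp only [pvSections, hb]
      exact ih _ _

-- A's loop from a live title equals pvSections
lemma foldA_sections (rest : List String) :
    ∀ (subs : List (Option String × List String)) (t : String) (buf : List String), t ≠ "" →
    pvFlushA (rest.foldl pvStepA (subs, some t, buf)) = subs ++ pvSections t buf rest := by
  induction rest with
  | nil =>
    intro subs t buf ht
    simp [pvFlushA, pvTruthyOptStr, pvSections, ht]
  | cons r rest ih =>
    intro subs t buf ht
    rw [List.foldl_cons]
    by_cases hb : pvHasBar r
    · have ht' := strip_ne_of_hasBar hb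
      have hstep : pvStepA (subs, some t, buf) r
          = (subs ++ [(some t, buf)], some (PySem.Str.strip r), []) := by
        simp [pvStepA, hb, pvFlushA, pvTruthyOptStr, ht]
      rw [hstep, ih _ _ _ ht']
      simp [pvSections, hb]
    · have hstep : pvStepA (subs, some t, buf) r = (subs, some t, buf ++ [r]) := by
        simp [pvStepA, hb]
      rw [hstep, ih _ _ _ ht]
      simp [pvSections, hb]

-- A's whole loop (title still None) in terms of dropWhile
lemma foldA_top (lines : List String) :
    ∀ (buf : List String),
    pvFlushA (lines.foldl pvStepA ([], none, buf)) =
      match lines.dropWhile (fun l => !pvHasBar l) with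
      | [] => []
      | t :: rest => pvSections (PySem.Str.strip t) [] rest := by
  induction lines with
  | nil => intro buf; simp [pvFlushA, pvTruthyOptStr]
  | cons l ls ih =>
    intro buf
    rw [List.foldl_cons]
    by_cases hb : pvHasBar l
    · have ht' := strip_ne_of_hasBar hb
      have hstep : pvStepA ([], none, buf) l = ([], some (PySem.Str.strip l), []) := by
        simp [pvStepA, hb, pvFlushA, pvTruthyOptStr]
      rw [hstep, foldA_sections ls _ _ _ ht']
      simp [hb]
    · have hstep : pvStepA ([], none, buf) l = ([], none, buf ++ [l]) := by
        simp [pvStepA, hb]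
      rw [hstep, ih (buf ++ [l])]
      simp [hb]

-- B's chunks in terms of pvSections
lemma sections_chunks (body : List String) :
    ∀ (t : String) (buf : List String),
    pvSections t buf body =
      (some t, buf ++ body.take (body.findIdx pvHasBar)) ::
        (if body.findIdx pvHasBar < body.length then pvChunks (body.drop (body.findIdx pvHasBar)) else []) := by
  induction body with
  | nil => intro t buf; simp [pvSections]
  | cons r body ih =>
    intro t buf
    by_cases hb : pvHasBar r
    · simp only [pvSections, hb, if_pos, List.findIdx_cons, cond_true, List.take_zero,
        List.append_nil, List.length_cons, List.drop_zero]
      rw [ih (PySem.Str.strip r) []]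
      simp only [pvChunks]
      simp
    · simp only [pvSections, hb, Bool.false_eq_true, if_false, List.findIdx_cons, cond_false]
      rw [ih t (buf ++ [r])]
      simp only [List.take_succ_cons, List.drop_succ_cons, List.length_cons,
        Nat.add_lt_add_iff_right, List.append_assoc, List.singleton_append]

lemma chunks_eq_sections (t : String) (body : List String) :
    pvChunks (t :: body) = pvSections (PySem.Str.strip t) [] body := by
  rw [sections_chunks body (PySem.Str.strip t) []]
  simp only [pvChunks]
  simp

-- drop at findIdx is dropWhile of the negation
lemma drop_findIdx_eq_dropWhile (lines : List String) :
    lines.drop (lines.findIdx pvHasBar) = lines.dropWhile (fun l => !pvHasBar l) := by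
  induction lines with
  | nil => simp
  | cons l ls ih =>
    by_cases hb : pvHasBar l
    · simp [List.findIdx_cons, hb]
    · simp [List.findIdx_cons, hb, ih]

lemma findIdx_lt_iff_dropWhile_ne_nil (lines : List String) :
    lines.findIdx pvHasBar < lines.length ↔ lines.dropWhile (fun l => !pvHasBar l) ≠ [] := by
  induction lines with
  | nil => simp
  | cons l ls ih =>
    by_cases hb : pvHasBar l
    · simp [List.findIdx_cons, hb]
    · simp [List.findIdx_cons, hb, ← ih]

-- ===== VERDICT (by name: the statement is the Claim_ definition above) =====
theorem split_into_subsections_spec : Claim_equal_split_into_subsections := by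
  intro lines _
  unfold Spec_split_into_subsections
  show (if (pvFlushA (List.foldl pvStepA ([], none, []) lines)).isEmpty then [(none, lines)]
        else pvFlushA (List.foldl pvStepA ([], none, []) lines))
      = (if List.findIdx pvHasBar lines < lines.length
        then pvChunks (lines.drop (List.findIdx pvHasBar lines)) else [(none, lines)])
  rw [foldA_top lines []]
  by_cases h : lines.findIdx pvHasBar < lines.length
  · have hne := (findIdx_lt_iff_dropWhile_ne_nil lines).mp h
    rcases hd : lines.dropWhile (fun l => !pvHasBar l) with _ | ⟨t, rest⟩
    · exact absurd hd hne
    · simp only [hd, if_pos h, drop_findIdx_eq_dropWhile, chunks_eq_sections]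
      have hnn := pvSections_ne_nil (PySem.Str.strip t) [] rest
      simp [List.isEmpty_iff, hnn]
  · have hnil : lines.dropWhile (fun l => !pvHasBar l) = [] := by
      by_contra hc
      exact h ((findIdx_lt_iff_dropWhile_ne_nil lines).mpr hc)
    simp [hnil, h]
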